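-- pv_equiv track=rewrite | github.com/GameRuiner/Uniwersytet | I semestr/WDI/L8/b.py | minN
-- ===== SOURCE A (Python) =====
-- def minN(a,b,p):
--     if p==b: return a[p]
--     elif p-b == 1:
--             if a[p]<a[b]: return a[p]
--             else: return a[b]
--     else:
--         s=(b+p)//2
--         m1 = minN(a,b,s)
--         m2 = minN(a,s+1,p)
--         if m1 < m2: return m1
--         else: return m2
-- ===== SOURCE B (Python) =====
-- def minN(a,b,p):
--     m = a[b]
--     for i in range(b+1, p+1):
--         if a[i] < m:
--             m = a[i]
--     return m
-- ===== Notes on version B (the rewrite author's own statement) =====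
-- stated objective: simpler
-- what changed: Replaces the midpoint-splitting divide-and-conquer recursion with a single iterative left-to-right scan over indices b..p that keeps the running minimum.
import Mathlib
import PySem

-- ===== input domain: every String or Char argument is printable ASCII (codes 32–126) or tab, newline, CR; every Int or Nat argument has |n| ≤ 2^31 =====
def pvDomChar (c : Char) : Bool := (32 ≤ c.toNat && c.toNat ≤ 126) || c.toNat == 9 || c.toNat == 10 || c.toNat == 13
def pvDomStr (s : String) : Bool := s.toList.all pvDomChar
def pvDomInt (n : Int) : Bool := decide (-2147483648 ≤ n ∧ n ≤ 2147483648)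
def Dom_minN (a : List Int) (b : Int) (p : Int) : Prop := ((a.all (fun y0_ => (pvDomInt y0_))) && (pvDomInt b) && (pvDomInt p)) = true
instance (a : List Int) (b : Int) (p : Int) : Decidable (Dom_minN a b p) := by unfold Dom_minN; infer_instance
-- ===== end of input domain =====

-- B replaces A's midpoint divide-and-conquer recursion by one iterative forward scan keeping the running minimum (simpler, same O(n) cost).


-- ===== PORT A =====
-- fuel-bounded transliteration of A's recursion; the wrapper supplies enough fuel for every input Pre_ admits
def minNgo : Nat → List Int → Int → Int → Int
  | 0, _, _, _ => 0
  | f+1, a, b, p =>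
    if p = b then PySem.List.pyGetD a p 0
    else if p - b = 1 then
      if PySem.List.pyGetD a p 0 < PySem.List.pyGetD a b 0 then PySem.List.pyGetD a p 0
      else PySem.List.pyGetD a b 0
    else
      let s := PySem.Int.floordiv (b + p) 2
      let m1 := minNgo f a b s
      let m2 := minNgo f a (s + 1) p
      if m1 < m2 then m1 else m2

def minN (a : List Int) (b : Int) (p : Int) : Int := minNgo ((p - b).toNat + 1) a b p

-- ===== PORT B =====
def minN_alt (a : List Int) (b : Int) (p : Int) : Int :=
  (PySem.List.pyRange (b + 1) (p + 1) 1).foldl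
    (fun m i => if PySem.List.pyGetD a i 0 < m then PySem.List.pyGetD a i 0 else m)
    (PySem.List.pyGetD a b 0)

-- ===== PRECONDITION & SPEC =====
-- Pre_ excludes exactly the inputs where the Python A does not return: p < b (infinite recursion)
-- and any index of b..p outside Python's negative-wraparound range (IndexError at a leaf access).
def Pre_minN (a : List Int) (b : Int) (p : Int) : Prop :=
  b ≤ p ∧ -(a.length : Int) ≤ b ∧ p < (a.length : Int)
instance (a : List Int) (b : Int) (p : Int) : Decidable (Pre_minN a b p) := by
  unfold Pre_minN; infer_instance

def pvWitness_minN : List Int × Int × Int := ([3, 1, 2], 0, 2)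

def Spec_minN (a : List Int) (b : Int) (p : Int) (out : Int) : Prop := out = minN_alt a b p
instance (a : List Int) (b : Int) (p : Int) (out : Int) : Decidable (Spec_minN a b p out) := by
  unfold Spec_minN; infer_instance

-- ===== CLAIM (what is proved, stated in full; the proofs are below) =====
def Claim_equal_minN : Prop := ∀ (a : List Int) (b : Int) (p : Int),
  Dom_minN a b p → Pre_minN a b p → Spec_minN a b p (minN a b p)

-- ===== LEMMAS AND PROOFS =====

-- reference value: left fold of `min` over a[b], a[b+1], …, a[p]
def fmin (a : List Int) (b p : Int) : Int :=
  (PySem.List.pyRange (b + 1) (p + 1) 1).foldl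
    (fun m i => min m (PySem.List.pyGetD a i 0)) (PySem.List.pyGetD a b 0)

theorem foldl_if_eq_min (a : List Int) (l : List Int) (m : Int) :
    l.foldl (fun m i => if PySem.List.pyGetD a i 0 < m then PySem.List.pyGetD a i 0 else m) m
      = l.foldl (fun m i => min m (PySem.List.pyGetD a i 0)) m := by
  induction l generalizing m with
  | nil => rfl
  | cons i t ih =>
    simp only [List.foldl_cons, ih]
    congr 1
    rcases lt_or_ge (PySem.List.pyGetD a i 0) m with h | h
    · simp [h, min_eq_right h.le]
    · simp [not_lt.mpr h, min_eq_left h]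

theorem foldl_min_acc (a : List Int) (l : List Int) (x y : Int) :
    l.foldl (fun m i => min m (PySem.List.pyGetD a i 0)) (min x y)
      = min x (l.foldl (fun m i => min m (PySem.List.pyGetD a i 0)) y) := by
  induction l generalizing y with
  | nil => rfl
  | cons i t ih =>
    simp only [List.foldl_cons, min_assoc, ih]

theorem fmin_split (a : List Int) (b s p : Int) (h1 : b ≤ s) (h2 : s < p) :
    fmin a b p = min (fmin a b s) (fmin a (s + 1) p) := by
  unfold fmin
  rw [PySem.List.pyRange_one_append (b + 1) (s + 1) (p + 1) (by omega) (by omega),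
      List.foldl_append,
      PySem.List.pyRange_one_cons (by omega : s + 1 < p + 1)]
  simp only [List.foldl_cons]
  exact foldl_min_acc a _ _ _

theorem minNgo_eq_fmin (f : Nat) (a : List Int) (b p : Int)
    (hbp : b ≤ p) (hf : (p - b).toNat < f) :
    minNgo f a b p = fmin a b p := by
  induction f generalizing b p with
  | zero => omega
  | succ f ih =>
    by_cases h1 : p = b
    · subst h1
      simp [minNgo, fmin, PySem.List.pyRange_one_eq_nil (le_refl (p + 1))]
    · by_cases h2 : p - b = 1
      · have hpb : p = b + 1 := by omega
        subst hpb
        have : PySem.List.pyRange (b + 1 + 1) (b + 1 + 1) 1 = [] :=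
          PySem.List.pyRange_one_eq_nil (le_refl _)
        simp only [minNgo, fmin, if_neg h1, if_pos h2,
          PySem.List.pyRange_one_cons (by omega : b + 1 < b + 1 + 1), this,
          List.foldl_cons, List.foldl_nil]
        rcases lt_or_ge (PySem.List.pyGetD a (b + 1) 0) (PySem.List.pyGetD a b 0) with h | h
        · simp [h, min_eq_right h.le]
        · simp [not_lt.mpr h, min_eq_left h]
      · have hge : 2 ≤ p - b := by omega
        have hs : PySem.Int.floordiv (b + p) 2 = (b + p) / 2 :=
          PySem.Int.floordiv_eq_ediv_of_pos (by norm_num)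
        simp only [minNgo, if_neg h1, if_neg h2, hs]
        have hb : b ≤ (b + p) / 2 := by omega
        have hp : (b + p) / 2 < p := by omega
        rw [ih b ((b + p) / 2) hb (by omega), ih ((b + p) / 2 + 1) p (by omega) (by omega),
            fmin_split a b ((b + p) / 2) p hb hp]
        rcases lt_or_ge (fmin a b ((b + p) / 2)) (fmin a ((b + p) / 2 + 1) p) with h | h
        · simp [h, min_eq_left h.le]
        · simp [not_lt.mpr h, min_eq_right h]

theorem minN_alt_eq_fmin (a : List Int) (b p : Int) : minN_alt a b p = fmin a b p := by
  unfold minN_alt fmin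
  exact foldl_if_eq_min a _ _

-- ===== VERDICT (by name: the statement is the Claim_ definition above) =====
theorem minN_spec : Claim_equal_minN := by
  intro a b p _hDom hPre
  unfold Spec_minN
  rw [minN_alt_eq_fmin]
  exact minNgo_eq_fmin _ a b p hPre.1 (by omega)
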